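-- pv_equiv track=rewrite | github.com/yesl-kim/algorithm-problem-solving | f-lab/longest-substring-set/longest-substring-set.py | solution
-- ===== SOURCE A (Python) =====
-- from typing import List
--
-- def solution(s: str) -> List[str]:
--     substrings = set()
--     last_index = {char: i for i, char in enumerate(s)}
--
--     start, end = 0, last_index[s[0]]
--     for i, char in enumerate(s):
--         if end < i:
--             substrings.add(s[start: end + 1])
--             start, end = i, last_index[char]
--         else:
--             end = max(end, last_index[char])
--
--     substrings.add(s[start: end + 1])
--     return substrings
-- ===== SOURCE B (Python) =====
-- from typing import List
--
-- def solution(s: str) -> List[str]: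
--     # Pass 1: last occurrence of every character.
--     last = {}
--     for i, ch in enumerate(s):
--         last[ch] = i
--     # Pass 2: one interval [first, last] per distinct character, in first-occurrence order.
--     intervals = []
--     seen = set()
--     for i, ch in enumerate(s):
--         if ch not in seen:
--             seen.add(ch)
--             intervals.append((i, last[ch]))
--     # Pass 3: merge overlapping intervals; each merged interval is one substring.
--     start, end = intervals[0]
--     result = set()
--     for a, b in intervals[1:]:
--         if a <= end:
--             end = max(end, b)
--         else:
--             result.add(s[start:end + 1])
--             start, end = a, b
--     result.add(s[start:end + 1])
--     return result
-- ===== Notes on version B (the rewrite author's own statement) =====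
-- stated objective: alternative
-- what changed: A interleaves segment tracking with a single scan over every character position; B first extracts one [first,last] interval per distinct character (in first-occurrence order) and then runs a separate interval-merge pass over those intervals only.
import Mathlib
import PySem

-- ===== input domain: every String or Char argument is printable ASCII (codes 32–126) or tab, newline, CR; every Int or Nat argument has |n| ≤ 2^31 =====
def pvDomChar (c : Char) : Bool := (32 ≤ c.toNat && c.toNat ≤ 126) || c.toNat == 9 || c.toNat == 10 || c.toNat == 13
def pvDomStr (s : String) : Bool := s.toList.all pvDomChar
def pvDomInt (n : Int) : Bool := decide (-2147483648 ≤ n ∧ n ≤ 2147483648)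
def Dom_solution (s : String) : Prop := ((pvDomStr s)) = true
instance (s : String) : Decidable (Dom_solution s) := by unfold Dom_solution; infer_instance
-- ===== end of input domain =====

-- B extracts per-character [first,last] intervals and merges them in a separate pass,
-- instead of A's single scan that grows the current segment at every position (objective: alternative).
-- On s = "" both Pythons raise IndexError (A at s[0], B at intervals[0]); Pre_ excludes "".

-- ===== PORT A =====
-- {char: i for i, char in enumerate(s)}
def pvLast (cs : List Char) : PySem.Dict Char Int :=
  (PySem.List.enumerate cs 0).foldl (fun d p => d.insert p.2 p.1) PySem.Dict.empty

-- A's loop body: state = (start, end, substrings)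
def pvStepA (s : String) (lastIdx : PySem.Dict Char Int)
    (st : Int × Int × PySem.Set String) (p : Int × Char) : Int × Int × PySem.Set String :=
  if st.2.1 < p.1 then
    (p.1, lastIdx.getD p.2 0, PySem.Set.add st.2.2 (PySem.Str.slice s (some st.1) (some (st.2.1 + 1))))
  else
    (st.1, max st.2.1 (lastIdx.getD p.2 0), st.2.2)

def solution (s : String) : List String :=
  let lastIdx := pvLast s.toList
  match PySem.Str.pyGet? s 0 with   -- s[0]: none = IndexError on "", excluded by Pre_
  | none => []
  | some c0 =>
    -- last_index[s[0]] can never raise KeyError here (s[0] is a key); getD is exact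
    let fin := (PySem.List.enumerate s.toList 0).foldl (pvStepA s lastIdx)
      (0, lastIdx.getD c0 0, PySem.Set.empty)
    PySem.Set.add fin.2.2 (PySem.Str.slice s (some fin.1) (some (fin.2.1 + 1)))

-- ===== PORT B =====
-- pass 2: collect (first, last) intervals for unseen characters; state = (seen, intervals)
def pvStepIv (lastIdx : PySem.Dict Char Int)
    (st : PySem.Set Char × List (Int × Int)) (p : Int × Char) : PySem.Set Char × List (Int × Int) :=
  if PySem.Set.contains st.1 p.2 then st
  else (PySem.Set.add st.1 p.2, st.2 ++ [(p.1, lastIdx.getD p.2 0)])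

-- pass 3: merge loop body; state = (start, end, result)
def pvStepM (s : String) (st : Int × Int × PySem.Set String) (q : Int × Int) :
    Int × Int × PySem.Set String :=
  if q.1 ≤ st.2.1 then (st.1, max st.2.1 q.2, st.2.2)
  else (q.1, q.2, PySem.Set.add st.2.2 (PySem.Str.slice s (some st.1) (some (st.2.1 + 1))))

def solution_alt (s : String) : List String :=
  let lastIdx := pvLast s.toList
  let intervals := ((PySem.List.enumerate s.toList 0).foldl (pvStepIv lastIdx)
    (PySem.Set.empty, [])).2
  match intervals with   -- intervals[0]: IndexError on "", excluded by Pre_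
  | [] => []
  | q0 :: rest =>
    let fin := rest.foldl (pvStepM s) (q0.1, q0.2, PySem.Set.empty)
    PySem.Set.add fin.2.2 (PySem.Str.slice s (some fin.1) (some (fin.2.1 + 1)))

-- ===== PRECONDITION & SPEC =====
-- both Pythons raise IndexError on the empty string
def Pre_solution (s : String) : Prop := s ≠ ""
instance (s : String) : Decidable (Pre_solution s) := by unfold Pre_solution; infer_instance
def pvWitness_solution : String := "abac"
def Spec_solution (s : String) (out : List String) : Prop := out = solution_alt s
instance (s : String) (out : List String) : Decidable (Spec_solution s out) := by unfold Spec_solution; infer_instance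

-- ===== CLAIM (what is proved, stated in full; the proofs are below) =====
def Claim_equal_solution : Prop := ∀ (s : String), Dom_solution s → Pre_solution s → Spec_solution s (solution s)

-- ===== LEMMAS AND PROOFS =====

-- the interval list pass 2 produces, written as a structural recursion
def pvIvOf (L : Char → Int) : PySem.Set Char → List (Int × Char) → List (Int × Int)
  | _, [] => []
  | seen, p :: rest =>
    if PySem.Set.contains seen p.2 then pvIvOf L seen rest
    else (p.1, L p.2) :: pvIvOf L (PySem.Set.add seen p.2) rest

lemma pvStepIv_eq_ivOf (lastIdx : PySem.Dict Char Int) (pairs : List (Int × Char))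
    (seen : PySem.Set Char) (acc : List (Int × Int)) :
    (pairs.foldl (pvStepIv lastIdx) (seen, acc)).2
      = acc ++ pvIvOf (fun c => lastIdx.getD c 0) seen pairs := by
  induction pairs generalizing seen acc with
  | nil => simp [pvIvOf]
  | cons p rest ih =>
    simp only [List.foldl_cons, pvStepIv, pvIvOf]
    by_cases h : PySem.Set.contains seen p.2 = true
    · rw [if_pos h, if_pos h, ih]
    · rw [if_neg h, if_neg h, ih]
      simp

-- every value stored in the dict at key c stays ≥ i0 if all inserted values are ≥ i0
lemma pvLast_getD_mono (pairs : List (Int × Char)) (d : PySem.Dict Char Int)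
    (c : Char) (i0 : Int) (hd : i0 ≤ d.getD c 0) (hp : ∀ p ∈ pairs, i0 ≤ p.1) :
    i0 ≤ (pairs.foldl (fun d p => d.insert p.2 p.1) d).getD c 0 := by
  induction pairs generalizing d with
  | nil => simpa using hd
  | cons p rest ih =>
    simp only [List.foldl_cons]
    refine ih _ ?_ (fun q hq => hp q (List.mem_cons_of_mem _ hq))
    rw [PySem.Dict.getD_insert]
    split_ifs with h
    · exact hp p (List.mem_cons_self)
    · exact hd

-- last occurrence dominates every occurrence: i ≤ last[c] for (i, c) in enumerate(s)
lemma pvLast_ge (pairs : List (Int × Char)) (d : PySem.Dict Char Int)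
    (hmono : pairs.Pairwise (fun p q => p.1 ≤ q.1)) :
    ∀ p ∈ pairs, p.1 ≤ (pairs.foldl (fun d p => d.insert p.2 p.1) d).getD p.2 0 := by
  induction pairs generalizing d with
  | nil => intro p hp; simp at hp
  | cons p rest ih =>
    intro q hq
    rcases List.mem_cons.mp hq with rfl | hq'
    · simp only [List.foldl_cons]
      refine pvLast_getD_mono rest _ q.2 q.1 ?_ (List.pairwise_cons.mp hmono).1
      rw [PySem.Dict.getD_insert_self]
    · exact ih _ (List.pairwise_cons.mp hmono).2 q hq'

-- KEY: A's position-by-position scan equals the interval-merge over first-occurrence intervals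
lemma pvKey (s : String) (lastIdx : PySem.Dict Char Int) (pairs : List (Int × Char))
    (seen : PySem.Set Char) (start end_ : Int) (acc : PySem.Set String)
    (h1 : ∀ p ∈ pairs, p.1 ≤ lastIdx.getD p.2 0)
    (h2 : ∀ p ∈ pairs, p.2 ∈ seen → lastIdx.getD p.2 0 ≤ end_) :
    pairs.foldl (pvStepA s lastIdx) (start, end_, acc)
      = (pvIvOf (fun c => lastIdx.getD c 0) seen pairs).foldl (pvStepM s) (start, end_, acc) := by
  induction pairs generalizing seen start end_ acc with
  | nil => simp [pvIvOf]
  | cons p rest ih =>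
    have h1p : p.1 ≤ lastIdx.getD p.2 0 := h1 p (List.mem_cons_self)
    simp only [List.foldl_cons, pvIvOf]
    by_cases hs : PySem.Set.contains seen p.2
    · -- repeated character: A's step is a no-op
      have hin : p.2 ∈ seen := by
        simpa [PySem.Set.contains] using hs
      have hle : lastIdx.getD p.2 0 ≤ end_ := h2 p (List.mem_cons_self) hin
      have hnlt : ¬ end_ < p.1 := not_lt.mpr (le_trans h1p hle)
      simp only [pvStepA, hnlt, if_pos hs, max_eq_left hle]
      exact ih seen start end_ acc (fun q hq => h1 q (List.mem_cons_of_mem _ hq))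
        (fun q hq hm => h2 q (List.mem_cons_of_mem _ hq) hm)
    · simp only [if_neg hs, List.foldl_cons]
      by_cases hlt : end_ < p.1
      · -- gap: both emit the current substring and start a fresh segment
        simp only [pvStepA, if_pos hlt, pvStepM, if_neg (not_le.mpr hlt)]
        refine ih _ _ _ _ (fun q hq => h1 q (List.mem_cons_of_mem _ hq)) ?_
        intro q hq hm
        rcases (PySem.Set.mem_add seen p.2 q.2).mp hm with hm' | heq
        · exact le_trans (h2 q (List.mem_cons_of_mem _ hq) hm') (le_of_lt (lt_of_lt_of_le hlt h1p))
        · rw [heq]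
      · -- overlap: both extend the current segment
        simp only [pvStepA, if_neg hlt, pvStepM, if_pos (not_lt.mp hlt)]
        refine ih _ _ _ _ (fun q hq => h1 q (List.mem_cons_of_mem _ hq)) ?_
        intro q hq hm
        rcases (PySem.Set.mem_add seen p.2 q.2).mp hm with hm' | heq
        · exact le_trans (h2 q (List.mem_cons_of_mem _ hq) hm') (le_max_left _ _)
        · rw [heq]; exact le_max_right _ _

-- ===== VERDICT (by name: the statement is the Claim_ definition above) =====
theorem solution_spec : Claim_equal_solution := by
  intro s _ hpre
  unfold Spec_solution solution solution_alt
  obtain ⟨c0, cs, hcs⟩ : ∃ c0 cs, s.toList = c0 :: cs := by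
    cases h : s.toList with
    | nil =>
      exfalso; apply hpre
      have := congrArg String.ofList h
      simpa using this
    | cons a l => exact ⟨a, l, rfl⟩
  have hget : PySem.Str.pyGet? s 0 = some c0 := by
    simp [PySem.Str.pyGet?, hcs, PySem.List.pyGet?, PySem.List.pyIdx?]
  simp only [hget, hcs]
  set L := pvLast (c0 :: cs) with hL
  have h1 : ∀ p ∈ PySem.List.enumerate (c0 :: cs) 0, p.1 ≤ L.getD p.2 0 := by
    intro p hp
    exact pvLast_ge _ PySem.Dict.empty
      ((PySem.List.pairwise_lt_enumerate (c0 :: cs) 0).imp (fun h => le_of_lt h)) p hp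
  have h01 : (0 : Int) ≤ L.getD c0 0 := by
    have := h1 (0, c0) (by rw [PySem.List.enumerate_cons]; exact List.mem_cons_self)
    simpa using this
  -- A's fold over all positions = merge over the full interval list
  rw [pvKey s L (PySem.List.enumerate (c0 :: cs) 0) PySem.Set.empty 0 (L.getD c0 0)
    PySem.Set.empty h1 (fun q _ hm => by simp [PySem.Set.empty] at hm)]
  -- B's pass-2 fold produces the same interval list
  rw [pvStepIv_eq_ivOf L (PySem.List.enumerate (c0 :: cs) 0) PySem.Set.empty []]
  -- its head is (0, last[c0]); B consumes it as the initial state, A's merge as a no-op first step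
  rw [PySem.List.enumerate_cons]
  simp only [pvIvOf, List.nil_append]
  have hc0 : ¬ PySem.Set.contains PySem.Set.empty c0 := by simp [PySem.Set.empty, PySem.Set.contains]
  simp only [if_neg hc0, List.foldl_cons, pvStepM, if_pos h01, max_self]
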